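-- pv_equiv track=rewrite | github.com/chainer/chainercv | chainercv/links/model/faster_rcnn/faster_rcnn.py | _decide_when_to_stop
-- ===== SOURCE A (Python) =====
-- import copy
--
-- def _decide_when_to_stop(layers):
--     layers = copy.copy(layers)
--     if len(layers) == 0:
--         return 'start'
--
--     rpn_outs = [
--         'features', 'rpn_locs', 'rpn_scores',
--         'rois', 'batch_indices', 'anchor']
--     for layer in rpn_outs:
--         layers.pop(layer, None)
--
--     if len(layers) == 0:
--         return 'rpn'
--     return 'head'
-- ===== SOURCE B (Python) =====
-- def _decide_when_to_stop(layers):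
--     # Fold a maximum over a stage lattice: each key contributes stage 1 ('rpn')
--     # or 2 ('head'); 0 ('start') is the identity of the fold, so the empty
--     # dict needs no special case.
--     rpn_outs = ('features', 'rpn_locs', 'rpn_scores',
--                 'rois', 'batch_indices', 'anchor')
--     stage = 0
--     for key in layers:
--         s = 1 if key in rpn_outs else 2
--         if s > stage:
--             stage = s
--     return ('start', 'rpn', 'head')[stage]
-- ===== Notes on version B (the rewrite author's own statement) =====
-- stated objective: alternative
-- what changed: Instead of copying the dict and popping the six rpn-output keys, B maps each key to a stage rank (rpn=1, head=2) and folds a maximum with start=0 as identity, then indexes the stage table; there is no emptiness check, no dict copy/mutation and no subset test.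
import Mathlib
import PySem

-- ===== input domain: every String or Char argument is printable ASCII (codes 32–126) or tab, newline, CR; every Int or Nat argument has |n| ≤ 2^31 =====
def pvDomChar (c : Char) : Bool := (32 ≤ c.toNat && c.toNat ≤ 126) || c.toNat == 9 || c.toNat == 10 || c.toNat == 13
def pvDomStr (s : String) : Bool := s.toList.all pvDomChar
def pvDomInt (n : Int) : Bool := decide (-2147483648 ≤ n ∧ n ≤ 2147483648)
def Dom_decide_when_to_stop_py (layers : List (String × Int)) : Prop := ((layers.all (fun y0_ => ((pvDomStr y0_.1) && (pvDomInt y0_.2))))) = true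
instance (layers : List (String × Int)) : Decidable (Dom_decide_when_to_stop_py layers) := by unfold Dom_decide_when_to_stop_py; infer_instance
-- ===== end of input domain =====

-- B folds a maximum over a stage lattice (start=0 < rpn=1 < head=2) over the keys,
-- instead of A's copy-then-pop mutation with two emptiness checks (objective: alternative).

-- ===== PORT A =====
-- A: copy the dict, return 'start' if empty, pop each rpn-output key, then
-- 'rpn' if nothing is left, else 'head'.  (layers.pop(layer, None) = erase.)
def decide_when_to_stop_py (layers : List (String × Int)) : String :=
  let d : PySem.Dict String Int := ⟨layers⟩
  if PySem.Dict.size d = 0 then "start"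
  else
    let rpn_outs : List String :=
      ["features", "rpn_locs", "rpn_scores", "rois", "batch_indices", "anchor"]
    let d := rpn_outs.foldl (fun d k => PySem.Dict.erase d k) d
    if PySem.Dict.size d = 0 then "rpn" else "head"

-- ===== PORT B =====
-- B: fold max stage rank (rpn key → 1, other key → 2) starting from 0 ('start'),
-- then index the stage table; no emptiness check, no mutation.
def decide_when_to_stop_py_alt (layers : List (String × Int)) : String :=
  let rpn_outs : List String :=
    ["features", "rpn_locs", "rpn_scores", "rois", "batch_indices", "anchor"]
  let stage : Int := layers.foldl
    (fun st p =>
      let s : Int := if rpn_outs.contains p.1 then 1 else 2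
      if s > st then s else st) 0
  -- tuple index is always in range (stage ∈ {0,1,2}); none is unreachable
  (PySem.List.pyGet? ["start", "rpn", "head"] stage).getD ""

-- ===== PRECONDITION & SPEC =====
def Spec_decide_when_to_stop_py (layers : List (String × Int)) (out : String) : Prop := out = decide_when_to_stop_py_alt layers
instance (layers : List (String × Int)) (out : String) : Decidable (Spec_decide_when_to_stop_py layers out) := by unfold Spec_decide_when_to_stop_py; infer_instance

-- ===== CLAIM =====
def Claim_equal_decide_when_to_stop_py : Prop := ∀ (layers : List (String × Int)), Dom_decide_when_to_stop_py layers → Spec_decide_when_to_stop_py layers (decide_when_to_stop_py layers)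

-- ===== LEMMAS AND PROOFS =====

def pvRpn : List String :=
  ["features", "rpn_locs", "rpn_scores", "rois", "batch_indices", "anchor"]

def pvStep (st : Int) (p : String × Int) : Int :=
  let s : Int := if pvRpn.contains p.1 then 1 else 2
  if s > st then s else st

theorem pvStep_mem (st : Int) (p : String × Int) (h : p.1 ∈ pvRpn) (hst : st ≤ 1) :
    pvStep st p = 1 := by
  have h' : pvRpn.contains p.1 = true := by simpa using h
  unfold pvStep
  simp only [h', if_true]
  omega

theorem pvStep_not_mem (st : Int) (p : String × Int) (h : p.1 ∉ pvRpn) (hst : st ≤ 2) :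
    pvStep st p = 2 := by
  have h' : pvRpn.contains p.1 = false := by simpa using h
  unfold pvStep
  simp only [h', if_false, Bool.false_eq_true]
  omega

-- 2 is absorbing for the stage fold
theorem foldl_step_two (ls : List (String × Int)) :
    ls.foldl pvStep 2 = 2 := by
  induction ls with
  | nil => rfl
  | cons p ls ih =>
    simp only [List.foldl_cons]
    have : pvStep 2 p = 2 := by
      by_cases h : p.1 ∈ pvRpn <;> simp [pvStep, h]
    rw [this, ih]

-- from stage 1 the fold yields 1 iff every key is an rpn output, else 2
theorem foldl_step_one (ls : List (String × Int)) :
    ls.foldl pvStep 1 = if ls.all (fun p => pvRpn.contains p.1) then 1 else 2 := by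
  induction ls with
  | nil => rfl
  | cons p ls ih =>
    simp only [List.foldl_cons, List.all_cons]
    by_cases h : p.1 ∈ pvRpn
    · have hc : pvRpn.contains p.1 = true := by simpa using h
      rw [pvStep_mem 1 p h le_rfl, ih]
      simp only [hc, Bool.true_and]
    · have hc : pvRpn.contains p.1 = false := by simpa using h
      rw [pvStep_not_mem 1 p h (by omega), foldl_step_two]
      simp only [hc, Bool.false_and]
      simp

-- Folding `erase` over a list of keys filters out every pair whose key occurs in it.
theorem foldl_erase_eq_filter (ks : List String) (ls : List (String × Int)) :
    ks.foldl (fun d k => PySem.Dict.erase d k) (⟨ls⟩ : PySem.Dict String Int)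
      = ⟨ls.filter (fun p => !(ks.contains p.1))⟩ := by
  induction ks generalizing ls with
  | nil => simp
  | cons k ks ih =>
    simp only [List.foldl_cons]
    have : PySem.Dict.erase (⟨ls⟩ : PySem.Dict String Int) k
        = ⟨ls.filter (fun p => !(p.1 == k))⟩ := by
      simp [PySem.Dict.erase]
    rw [this, ih, List.filter_filter]
    congr 1
    apply List.filter_congr
    intro p _
    by_cases h : p.1 = k <;> simp [h]

theorem size_mk (ls : List (String × Int)) :
    PySem.Dict.size (⟨ls⟩ : PySem.Dict String Int) = ls.length := by
  simp [PySem.Dict.size]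

-- filter-empty ↔ all-keys-rpn bridge for A's side
theorem filter_len_iff (ls : List (String × Int)) :
    (ls.filter (fun q => !(pvRpn.contains q.1))).length = 0
      ↔ ls.all (fun q => pvRpn.contains q.1) = true := by
  rw [List.length_eq_zero_iff, List.filter_eq_nil_iff, List.all_eq_true]
  constructor
  · intro h q hq; have := h q hq; simpa using this
  · intro h q hq; simpa using h q hq

-- ===== VERDICT =====
theorem decide_when_to_stop_py_spec : Claim_equal_decide_when_to_stop_py := by
  intro layers _
  unfold Spec_decide_when_to_stop_py decide_when_to_stop_py decide_when_to_stop_py_alt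
  simp only [foldl_erase_eq_filter, size_mk]
  show (if layers.length = 0 then "start"
        else if (layers.filter (fun q => !(pvRpn.contains q.1))).length = 0
             then "rpn" else "head")
      = (PySem.List.pyGet? ["start", "rpn", "head"] (layers.foldl pvStep 0)).getD ""
  cases layers with
  | nil => rfl
  | cons p rest =>
    simp only [List.length_cons, Nat.succ_ne_zero, if_false, List.foldl_cons]
    by_cases hp : p.1 ∈ pvRpn
    · rw [pvStep_mem 0 p hp (by omega), foldl_step_one]
      by_cases hall : rest.all (fun q => pvRpn.contains q.1) = true
      · have h1 : (p :: rest).all (fun q => pvRpn.contains q.1) = true := by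
          have hc : pvRpn.contains p.1 = true := by simpa using hp
          rw [List.all_cons, hc, hall]
          rfl
        rw [if_pos ((filter_len_iff (p :: rest)).mpr h1), if_pos hall]
        rfl
      · have h2 : ¬ ((p :: rest).filter (fun q => !(pvRpn.contains q.1))).length = 0 := by
          intro h
          have := (filter_len_iff (p :: rest)).mp h
          simp only [List.all_cons, Bool.and_eq_true] at this
          exact hall this.2
        rw [if_neg h2, if_neg hall]
        rfl
    · rw [pvStep_not_mem 0 p hp (by omega), foldl_step_two]
      have h2 : ¬ ((p :: rest).filter (fun q => !(pvRpn.contains q.1))).length = 0 := by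
        intro h
        have := (filter_len_iff (p :: rest)).mp h
        simp only [List.all_cons, Bool.and_eq_true] at this
        exact hp (by simpa using this.1)
      rw [if_neg h2]
      rfl
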